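-- pv_equiv track=rewrite | github.com/DouniaBoudefla/Python_files | tp2.py | conv2vers1
-- ===== SOURCE A (Python) =====
-- def conv2vers1(R2):
--     a=len(R2)
--     M=[0]*(R2[a-1]+1)
--     for i in range(0,len(M)):
--         for j in range(0,len(R2)):
--             if i==R2[j]:
--                 M[i]=1
--     return M
-- ===== SOURCE B (Python) =====
-- def conv2vers1(R2):
--     n = R2[-1] + 1
--     M = [0] * n
--     for v in R2:
--         if 0 <= v < n:
--             M[v] = 1
--     return M
-- ===== Notes on version B (the rewrite author's own statement) =====
-- stated objective: faster
-- what changed: Replaced the nested scan (for each index i of M, scan all of R2) by one direct pass over R2 setting M[v]=1 for each in-range value v.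
import Mathlib
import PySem

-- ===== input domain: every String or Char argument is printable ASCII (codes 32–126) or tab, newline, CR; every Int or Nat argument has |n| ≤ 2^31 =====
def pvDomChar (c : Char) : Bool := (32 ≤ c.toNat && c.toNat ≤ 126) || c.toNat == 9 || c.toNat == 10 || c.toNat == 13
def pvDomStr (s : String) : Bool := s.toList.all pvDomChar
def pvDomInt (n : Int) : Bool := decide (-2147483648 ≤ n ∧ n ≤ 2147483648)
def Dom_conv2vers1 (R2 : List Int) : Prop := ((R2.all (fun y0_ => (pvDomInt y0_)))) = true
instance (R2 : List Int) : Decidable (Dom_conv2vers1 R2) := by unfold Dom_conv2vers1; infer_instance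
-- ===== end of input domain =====

-- B replaces A's nested scan (for every index of M, scan all of R2) by one direct
-- pass over R2 setting M[v]=1 for each in-range value v; objective: faster.

-- ===== PORT A =====
-- a = len(R2); M = [0]*(R2[a-1]+1); for i in range(0,len(M)): for j in range(0,len(R2)): if i==R2[j]: M[i]=1
-- R2[a-1] ported with pyGetD (the index is in range exactly under Pre_: R2 ≠ []);
-- Python's [0]*k is [] for k ≤ 0, matched exactly by Int.toNat's clamp on the replicate count.
def conv2vers1 (R2 : List Int) : List Int :=
  let a : Int := R2.length
  let M : List Int := List.replicate ((PySem.List.pyGetD R2 (a - 1) 0) + 1).toNat 0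
  (PySem.List.pyRange 0 M.length 1).foldl (fun M i =>
    (PySem.List.pyRange 0 R2.length 1).foldl (fun M j =>
      if i = PySem.List.pyGetD R2 j 0 then PySem.List.pySetD M i 1 else M) M) M

-- ===== PORT B =====
-- n = R2[-1] + 1; M = [0]*n; for v in R2: if 0 <= v < n: M[v] = 1
-- R2[-1] ported with pyGetD (in range exactly under Pre_: R2 ≠ []); [0]*n for n ≤ 0 is [] = toNat's clamp.
def conv2vers1_alt (R2 : List Int) : List Int :=
  let n : Int := (PySem.List.pyGetD R2 (-1) 0) + 1
  let M : List Int := List.replicate n.toNat 0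
  R2.foldl (fun M v => if 0 ≤ v ∧ v < n then PySem.List.pySetD M v 1 else M) M

-- ===== PRECONDITION & SPEC =====
-- Pre_: both Pythons raise IndexError on the empty list (A's R2[a-1], B's R2[-1]).
def Pre_conv2vers1 (R2 : List Int) : Prop := R2 ≠ []
instance (R2 : List Int) : Decidable (Pre_conv2vers1 R2) := by unfold Pre_conv2vers1; infer_instance
def pvWitness_conv2vers1 : List Int := [1, 3, 0, 3]

def Spec_conv2vers1 (R2 : List Int) (out : List Int) : Prop := out = conv2vers1_alt R2
instance (R2 : List Int) (out : List Int) : Decidable (Spec_conv2vers1 R2 out) := by unfold Spec_conv2vers1; infer_instance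

-- ===== CLAIM (what is proved, stated in full; the proofs are below) =====
def Claim_equal_conv2vers1 : Prop := ∀ (R2 : List Int), Dom_conv2vers1 R2 → Pre_conv2vers1 R2 → Spec_conv2vers1 R2 (conv2vers1 R2)

-- ===== LEMMAS AND PROOFS =====

-- A fold of "conditionally set one (nonnegative) position to 1", read back through getElem?.
lemma pv_foldl_set {α : Type} (L : List α) (p : α → Prop) [DecidablePred p]
    (idx : α → Int) (h : ∀ x ∈ L, p x → 0 ≤ idx x) (M : List Int) (t : Nat) :
    (L.foldl (fun M x => if p x then PySem.List.pySetD M (idx x) 1 else M) M)[t]? =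
      if t < M.length ∧ ∃ x ∈ L, p x ∧ idx x = (t : Int) then some 1 else M[t]? := by
  induction L generalizing M with
  | nil => simp
  | cons x L ih =>
    simp only [List.foldl_cons]
    by_cases hp : p x
    · have hx : 0 ≤ idx x := h x List.mem_cons_self hp
      rw [if_pos hp, ih (fun y hy => h y (List.mem_cons_of_mem _ hy)),
          PySem.List.pySetD_of_nonneg M 1 hx]
      simp only [List.length_set, List.getElem?_set]
      by_cases hlen : t < M.length
      · by_cases hE : ∃ y ∈ L, p y ∧ idx y = (t : Int)
        · obtain ⟨y, hy, hpy, hiy⟩ := hE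
          rw [if_pos ⟨hlen, y, hy, hpy, hiy⟩,
              if_pos ⟨hlen, y, List.mem_cons_of_mem x hy, hpy, hiy⟩]
        · rw [if_neg (fun hc => hE hc.2)]
          by_cases hxt : idx x = (t : Int)
          · have h1 : (idx x).toNat = t := by omega
            rw [if_pos h1, h1, if_pos hlen,
                if_pos ⟨hlen, x, List.mem_cons_self, hp, hxt⟩]
          · have h1 : (idx x).toNat ≠ t := by omega
            rw [if_neg h1, if_neg ?_]
            rintro ⟨-, y, hy, hpy, hiy⟩
            rcases List.mem_cons.mp hy with rfl | hy'
            · exact hxt hiy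
            · exact hE ⟨y, hy', hpy, hiy⟩
      · by_cases hxt : (idx x).toNat = t
        · simp [hlen, hxt]
        · simp [hlen, hxt]
    · rw [if_neg hp, ih (fun y hy => h y (List.mem_cons_of_mem _ hy))]
      congr 1
      simp only [eq_iff_iff]
      constructor
      · rintro ⟨h1, y, hy, hs⟩; exact ⟨h1, y, List.mem_cons_of_mem x hy, hs⟩
      · rintro ⟨h1, y, hy, hpy, hiy⟩
        rcases List.mem_cons.mp hy with rfl | hy'
        · exact absurd hpy hp
        · exact ⟨h1, y, hy', hpy, hiy⟩

-- A's inner loop over j collapses to "set M[i] := 1 iff i ∈ R2".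
lemma pv_inner (R2 : List Int) (i : Int) (hi : 0 ≤ i) (M : List Int) :
    (PySem.List.pyRange 0 R2.length 1).foldl (fun M j =>
        if i = PySem.List.pyGetD R2 j 0 then PySem.List.pySetD M i 1 else M) M
      = if i ∈ R2 then PySem.List.pySetD M i 1 else M := by
  rw [PySem.List.foldl_pyRange_zero_pyGetD' R2 0
        (fun M v => if i = v then PySem.List.pySetD M i 1 else M) M]
  induction R2 generalizing M with
  | nil => simp
  | cons v R2 ih =>
    simp only [List.foldl_cons]
    by_cases hv : i = v
    · rw [if_pos hv, ih]
      have hmem : i ∈ v :: R2 := by simp [hv]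
      rw [if_pos hmem]
      by_cases hR : i ∈ R2
      · rw [if_pos hR, PySem.List.pySetD_of_nonneg _ 1 hi, PySem.List.pySetD_of_nonneg _ 1 hi,
            List.set_set]
      · rw [if_neg hR]
    · rw [if_neg hv, ih]
      simp [List.mem_cons, hv]

lemma pv_A_char (R2 : List Int) (t : Nat) :
    (conv2vers1 R2)[t]? =
      (let N : Nat := ((PySem.List.pyGetD R2 ((R2.length : Int) - 1) 0) + 1).toNat
       if t < N ∧ (t : Int) ∈ R2 then some 1 else (List.replicate N (0 : Int))[t]?) := by
  unfold conv2vers1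
  simp only [List.length_replicate]
  rw [PySem.List.foldl_congr_mem' _ _
        (fun M i => if i ∈ R2 then PySem.List.pySetD M i 1 else M) _
        (fun i hmem M => pv_inner R2 i (PySem.List.mem_pyRange_one.mp hmem).1 M)]
  rw [pv_foldl_set _ (· ∈ R2) (fun i => i)
        (fun i hmem _ => (PySem.List.mem_pyRange_one.mp hmem).1) _ t]
  simp only [List.length_replicate]
  congr 1
  simp only [eq_iff_iff, PySem.List.mem_pyRange_one]
  constructor
  · rintro ⟨h1, i, ⟨-, -⟩, hm, rfl⟩; exact ⟨h1, hm⟩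
  · rintro ⟨h1, hm⟩; exact ⟨h1, (t : Int), ⟨by omega, by omega⟩, hm, rfl⟩

lemma pv_B_char (R2 : List Int) (t : Nat) :
    (conv2vers1_alt R2)[t]? =
      (let N : Nat := ((PySem.List.pyGetD R2 (-1) 0) + 1).toNat
       if t < N ∧ (t : Int) ∈ R2 then some 1 else (List.replicate N (0 : Int))[t]?) := by
  unfold conv2vers1_alt
  rw [pv_foldl_set R2 (fun v => 0 ≤ v ∧ v < (PySem.List.pyGetD R2 (-1) 0) + 1) (fun v => v)
        (fun v _ hv => hv.1) _ t]
  simp only [List.length_replicate]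
  congr 1
  simp only [eq_iff_iff]
  constructor
  · rintro ⟨h1, v, hv, ⟨-, -⟩, rfl⟩; exact ⟨h1, hv⟩
  · rintro ⟨h1, hm⟩; exact ⟨h1, (t : Int), hm, ⟨by omega, by omega⟩, rfl⟩

-- ===== VERDICT (by name: the statement is the Claim_ definition above) =====
theorem conv2vers1_spec : Claim_equal_conv2vers1 := by
  intro R2 _ hpre
  unfold Spec_conv2vers1
  have hlast : PySem.List.pyGetD R2 ((R2.length : Int) - 1) 0 = PySem.List.pyGetD R2 (-1) 0 := by
    rw [PySem.List.pyGetD_neg_one R2 0 hpre,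
        PySem.List.pyGetD_eq_getElem _ _ (by
          have := List.length_pos_iff.mpr hpre; omega) (by
          have := List.length_pos_iff.mpr hpre; omega)]
    rw [List.getLast_eq_getElem]
    congr 1
    omega
  apply List.ext_getElem?
  intro t
  rw [pv_A_char, pv_B_char, hlast]
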